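-- pv_equiv track=rewrite | github.com/mclevey/mclevey.github.io | scripts/build_blog.py | format_code_output
-- ===== SOURCE A (Python) =====
-- def format_code_output(body: str) -> str:
--     """
--     Format code output blocks with proper HTML.
--
--     Quarto renders code output as 4-space indented text. We wrap these
--     in <pre class="code-output"> blocks for styling.
--     """
--     lines = body.split("\n")
--     result = []
--     in_code_block = False
--     output_buffer = []
--
--     def flush_output():
--         if output_buffer:
--             result.append('<pre class="code-output">' + "\n".join(output_buffer) + '</pre>')
--             output_buffer.clear()
--
--     for line in lines:
--         # Track fenced code blocks
--         if line.strip().startswith("```"):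
--             flush_output()
--             in_code_block = not in_code_block
--             result.append(line)
--             continue
--
--         # 4-space indented lines outside code blocks are output
--         if not in_code_block and line.startswith("    "):
--             output_buffer.append(line[4:])  # Strip the 4-space indent
--         else:
--             flush_output()
--             result.append(line)
--
--     flush_output()
--     return "\n".join(result)
-- ===== SOURCE B (Python) =====
-- def format_code_output(body: str) -> str:
--     # Two-pass: classify each line once, then group consecutive output lines.
--     tagged = []
--     in_code = False
--     for line in body.split("\n"):
--         if line.strip().startswith("```"):
--             in_code = not in_code
--             tagged.append((0, line))
--         elif not in_code and line.startswith("    "):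
--             tagged.append((1, line[4:]))
--         else:
--             tagged.append((0, line))
--     out = []
--     i = 0
--     n = len(tagged)
--     while i < n:
--         tag, text = tagged[i]
--         if tag == 1:
--             j = i + 1
--             while j < n and tagged[j][0] == 1:
--                 j += 1
--             joined = "\n".join(t[1] for t in tagged[i:j])
--             out.append('<pre class="code-output">' + joined + '</pre>')
--             i = j
--         else:
--             out.append(text)
--             i += 1
--     return "\n".join(out)
-- ===== Notes on version B (the rewrite author's own statement) =====
-- stated objective: alternative
-- what changed: Replaces A's single stateful loop with mutable buffer/flush bookkeeping by a two-pass pipeline: one pass tags each line (fence/plain vs output), a second pass groups maximal runs of output lines into <pre> blocks.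
import Mathlib
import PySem

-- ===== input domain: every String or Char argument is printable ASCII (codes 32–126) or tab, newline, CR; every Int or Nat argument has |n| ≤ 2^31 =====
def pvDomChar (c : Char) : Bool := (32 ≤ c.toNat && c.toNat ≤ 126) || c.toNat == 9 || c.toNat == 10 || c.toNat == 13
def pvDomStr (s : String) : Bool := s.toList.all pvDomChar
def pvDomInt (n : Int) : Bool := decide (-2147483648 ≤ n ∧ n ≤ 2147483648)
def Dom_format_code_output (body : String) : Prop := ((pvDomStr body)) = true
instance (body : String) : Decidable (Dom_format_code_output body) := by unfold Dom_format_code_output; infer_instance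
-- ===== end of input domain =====

-- B replaces A's buffered single loop by a classify-then-group two-pass pipeline (objective: alternative, same cost).

-- ===== PORT A =====
-- shared literal translations of the identical Python expressions in A and B
def pvFence (l : String) : Bool := PySem.Str.startswith (PySem.Str.strip l) "```"
def pvIndent (l : String) : Bool := PySem.Str.startswith l "    "
def pvPre (buf : List String) : String := "<pre class=\"code-output\">" ++ PySem.Str.join "\n" buf ++ "</pre>"
def pvDeindent (l : String) : String := PySem.Str.slice l (some 4) none

-- flush_output: appends the <pre> block if the buffer is nonempty
def pvFlushA (buf : List String) : List String := if buf.isEmpty then [] else [pvPre buf]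

-- A's for-loop over the lines with state (result, in_code_block, output_buffer); final flush at the end
def pvLoopA : List String → List String → Bool → List String → List String
  | [], res, _, buf => res ++ pvFlushA buf
  | l :: rest, res, ic, buf =>
    if pvFence l then pvLoopA rest (res ++ pvFlushA buf ++ [l]) (!ic) []
    else if !ic && pvIndent l then pvLoopA rest res ic (buf ++ [pvDeindent l])
    else pvLoopA rest (res ++ pvFlushA buf ++ [l]) ic []

def format_code_output (body : String) : String :=
  PySem.Str.join "\n" (pvLoopA ((PySem.Str.split? body "\n").getD []) [] false [])

-- ===== PORT B =====
-- first pass: tag each line (1 = output line, de-indented; 0 = fence or plain), tracking in_code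
def pvClassify : Bool → List String → List (Nat × String)
  | _, [] => []
  | ic, l :: rest =>
    if pvFence l then (0, l) :: pvClassify (!ic) rest
    else if !ic && pvIndent l then (1, pvDeindent l) :: pvClassify ic rest
    else (0, l) :: pvClassify ic rest

-- second pass: emit each maximal run of tag-1 lines as one <pre> block (the two while loops of Source B)
def pvGroup : List (Nat × String) → List String
  | [] => []
  | (t, l) :: rest =>
    if t == 1 then
      pvPre (l :: (rest.takeWhile (fun p => p.1 == 1)).map Prod.snd)
        :: pvGroup (rest.dropWhile (fun p => p.1 == 1))
    else l :: pvGroup rest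
termination_by ts => ts.length
decreasing_by
  · have := List.length_dropWhile_le (fun p : Nat × String => p.1 == 1) rest
    simp; omega
  · simp

def format_code_output_alt (body : String) : String :=
  PySem.Str.join "\n" (pvGroup (pvClassify false ((PySem.Str.split? body "\n").getD [])))

-- ===== PRECONDITION & SPEC =====
def Spec_format_code_output (body : String) (out : String) : Prop := out = format_code_output_alt body
instance (body : String) (out : String) : Decidable (Spec_format_code_output body out) := by unfold Spec_format_code_output; infer_instance

-- ===== CLAIM (what is proved, stated in full; the proofs are below) =====
def Claim_equal_format_code_output : Prop := ∀ (body : String), Dom_format_code_output body → Spec_format_code_output body (format_code_output body)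

-- ===== LEMMAS AND PROOFS =====

-- proof-side bridge: pvGroup with a pending buffer of already-collected output lines
def pvGroup' : List String → List (Nat × String) → List String
  | buf, [] => pvFlushA buf
  | buf, (t, l) :: rest =>
    if t == 1 then pvGroup' (buf ++ [l]) rest
    else pvFlushA buf ++ l :: pvGroup' [] rest

lemma pvGroup'_eq (ts : List (Nat × String)) : ∀ buf : List String,
    pvGroup' buf ts =
      if buf.isEmpty then pvGroup ts
      else pvPre (buf ++ (ts.takeWhile (fun p => p.1 == 1)).map Prod.snd)
             :: pvGroup (ts.dropWhile (fun p => p.1 == 1)) := by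
  induction ts with
  | nil =>
    intro buf
    cases buf <;> simp [pvGroup', pvGroup, pvFlushA]
  | cons hd rest ih =>
    intro buf
    obtain ⟨t, l⟩ := hd
    by_cases ht : (t == 1) = true
    · rw [show pvGroup' buf ((t, l) :: rest) = pvGroup' (buf ++ [l]) rest by
        simp [pvGroup', ht]]
      rw [ih (buf ++ [l])]
      cases buf <;> simp [pvGroup, ht]
    · rw [show pvGroup' buf ((t, l) :: rest) = pvFlushA buf ++ l :: pvGroup' [] rest by
        simp [pvGroup', ht]]
      rw [ih []]
      cases buf <;> simp [pvGroup, pvFlushA, ht]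

lemma pvLoopA_eq (lines : List String) : ∀ (res : List String) (ic : Bool) (buf : List String),
    pvLoopA lines res ic buf = res ++ pvGroup' buf (pvClassify ic lines) := by
  induction lines with
  | nil => intro res ic buf; simp [pvLoopA, pvClassify, pvGroup']
  | cons l rest ih =>
    intro res ic buf
    by_cases hf : pvFence l = true
    · simp [pvLoopA, pvClassify, hf, ih, pvGroup']
    · by_cases hi : (!ic && pvIndent l) = true
      · simp [pvLoopA, pvClassify, hf, hi, ih, pvGroup']
      · simp [pvLoopA, pvClassify, hf, hi, ih, pvGroup']

-- ===== VERDICT (by name: the statement is the Claim_ definition above) =====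
theorem format_code_output_spec : Claim_equal_format_code_output := by
  intro body _
  unfold Spec_format_code_output format_code_output format_code_output_alt
  rw [pvLoopA_eq, pvGroup'_eq]
  simp
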